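-- pv_equiv track=rewrite | github.com/CZboop/Challenges-and-Interview-Question-Practice | codesignal/python/absoluteValuesSumMinimization.py | solution
-- ===== SOURCE A (Python) =====
-- def solution(a):
--     diffs = {}
--     for i in a:
--         x = 0
--         for j in a:
--             x += abs(j - i)
--         diffs[i] = x
--     return min(diffs, key = diffs.get)
-- ===== SOURCE B (Python) =====
-- def solution(a):
--     # O(n log n): sort once, derive each distinct value's cost of absolute
--     # differences from prefix sums in one sweep, then pick the first element
--     # of a (original order) with minimal cost.
--     s = sorted(a)
--     n = len(s)
--     total = sum(s)
--     cost = {}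
--     pref = 0
--     for i, v in enumerate(s):
--         cost[v] = v * i - pref + (total - pref) - v * (n - i)
--         pref += v
--     return min(a, key=cost.get)
-- ===== Notes on version B (the rewrite author's own statement) =====
-- stated objective: faster
-- what changed: Instead of recomputing the sum of absolute differences for every element with a nested loop, B sorts the list once and derives each distinct value's cost from running prefix sums in a single sweep, then picks the first element of the original list with minimal cost.
import Mathlib
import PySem

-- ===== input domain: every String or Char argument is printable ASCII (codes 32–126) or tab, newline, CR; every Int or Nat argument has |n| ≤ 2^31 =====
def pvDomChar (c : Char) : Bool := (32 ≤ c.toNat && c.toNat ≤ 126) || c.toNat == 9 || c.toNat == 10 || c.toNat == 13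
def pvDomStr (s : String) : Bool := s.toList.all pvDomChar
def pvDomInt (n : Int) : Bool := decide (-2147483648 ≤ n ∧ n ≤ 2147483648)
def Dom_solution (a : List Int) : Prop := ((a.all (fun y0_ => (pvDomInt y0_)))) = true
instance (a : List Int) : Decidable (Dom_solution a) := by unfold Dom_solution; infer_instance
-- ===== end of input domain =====

-- B replaces A's quadratic nested loop by one sort + one prefix-sum sweep (O(n log n)).

-- ===== PORT A =====
def solution (a : List Int) : Int :=
  let diffs := a.foldl (fun (d : PySem.Dict Int Int) i =>
      let x := a.foldl (fun x j => x + |j - i|) 0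
      d.insert i x) PySem.Dict.empty
  -- min(diffs, key=diffs.get): first key (insertion order) with minimal value;
  -- every key is present, so diffs.get is ported as getD _ 0; the empty list
  -- (ValueError from min) is excluded by Pre_solution
  (PySem.List.min? diffs.keys (fun k => diffs.getD k 0)).getD 0

-- ===== PORT B =====
def solution_alt (a : List Int) : Int :=
  let s := PySem.List.sorted a (fun x => x) false
  let n : Int := s.length
  let total : Int := s.foldl (fun acc x => acc + x) 0
  let cost := ((PySem.List.enumerate s 0).foldl
      (fun (st : PySem.Dict Int Int × Int) iv =>
        (st.1.insert iv.2 (iv.2 * iv.1 - st.2 + (total - st.2) - iv.2 * (n - iv.1)), st.2 + iv.2))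
      (PySem.Dict.empty, 0)).1
  -- min(a, key=cost.get): every element of a is a key of cost, getD _ 0; the
  -- empty list (ValueError from min) is excluded by Pre_solution
  (PySem.List.min? a (fun v => cost.getD v 0)).getD 0

-- ===== PRECONDITION & SPEC =====
-- Python's min raises ValueError on an empty dict/list, in both A and B.
def Pre_solution (a : List Int) : Prop := a ≠ []
instance (a : List Int) : Decidable (Pre_solution a) := by unfold Pre_solution; infer_instance
def pvWitness_solution : List Int := [1, 2, 3]

def Spec_solution (a : List Int) (out : Int) : Prop := out = solution_alt a
instance (a : List Int) (out : Int) : Decidable (Spec_solution a out) := by unfold Spec_solution; infer_instance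

-- ===== CLAIM =====
def Claim_equal_solution : Prop := ∀ (a : List Int), Dom_solution a → Pre_solution a → Spec_solution a (solution a)

-- ===== LEMMAS AND PROOFS =====

/-- The cost A and B both compute for a candidate value `v`. -/
def costSum (a : List Int) (v : Int) : Int := (a.map (fun x => |x - v|)).sum

lemma absSum_le (l : List Int) (v : Int) (h : ∀ x ∈ l, x ≤ v) :
    (l.map (fun x => |x - v|)).sum = v * l.length - l.sum := by
  induction l with
  | nil => simp
  | cons x t ih =>
    have hx : x ≤ v := h x (by simp)
    have ht := ih (fun y hy => h y (by simp [hy]))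
    simp only [List.map_cons, List.sum_cons, List.length_cons]
    rw [ht, abs_of_nonpos (by omega)]
    push_cast; ring

lemma absSum_ge (l : List Int) (v : Int) (h : ∀ x ∈ l, v ≤ x) :
    (l.map (fun x => |x - v|)).sum = l.sum - v * l.length := by
  induction l with
  | nil => simp
  | cons x t ih =>
    have hx : v ≤ x := h x (by simp)
    have ht := ih (fun y hy => h y (by simp [hy]))
    simp only [List.map_cons, List.sum_cons, List.length_cons]
    rw [ht, abs_of_nonneg (by omega)]
    push_cast; ring

/-- The prefix-sum closed form equals the absolute-difference sum on a sorted split. -/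
lemma cost_split (p t : List Int) (v : Int)
    (hp : ∀ x ∈ p, x ≤ v) (ht : ∀ x ∈ t, v ≤ x) :
    v * (p.length : Int) - p.sum + ((p ++ v :: t).sum - p.sum)
      - v * (((p ++ v :: t).length : Int) - (p.length : Int))
      = costSum (p ++ v :: t) v := by
  unfold costSum
  have h1 := absSum_le p v hp
  have h2 := absSum_ge t v ht
  simp only [List.map_append, List.sum_append, List.map_cons, List.sum_cons,
    List.length_append, List.length_cons]
  rw [h1, h2, sub_self, abs_zero]
  push_cast; ring

/-- A dict built by inserting a key-determined value for every list element. -/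
lemma getD_foldl_insert_fun (l : List Int) (f : Int → Int) :
    ∀ (d : PySem.Dict Int Int) (k : Int),
      (l.foldl (fun d i => d.insert i (f i)) d).getD k 0
        = if k ∈ l then f k else d.getD k 0 := by
  induction l with
  | nil => intro d k; simp
  | cons i t ih =>
    intro d k
    rw [List.foldl_cons, ih]
    by_cases hk : k ∈ t
    · simp [hk]
    · by_cases hv : k = i <;>
        simp [hk, hv, PySem.Dict.getD_insert, List.mem_cons]

/-- B's sweep over the sorted list writes `costSum s v` for every element it meets. -/
lemma Bfold (s : List Int) (hs : List.Pairwise (fun a b : Int => a ≤ b) s) :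
    ∀ (t p : List Int) (d : PySem.Dict Int Int) (k : Int), s = p ++ t →
      (((PySem.List.enumerate t (p.length : Int)).foldl
          (fun (st : PySem.Dict Int Int × Int) iv =>
            (st.1.insert iv.2 (iv.2 * iv.1 - st.2 + (s.sum - st.2)
               - iv.2 * ((s.length : Int) - iv.1)), st.2 + iv.2))
          (d, p.sum)).1).getD k 0
        = if k ∈ t then costSum s k else d.getD k 0 := by
  intro t
  induction t with
  | nil => intro p d k _; simp [PySem.List.enumerate]
  | cons v t' ih =>
    intro p d k hsplit
    have hsplit' : s = (p ++ [v]) ++ t' := by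
      rw [hsplit, List.append_assoc]; rfl
    have hp : ∀ x ∈ p, x ≤ v := by
      rw [hsplit] at hs
      have := (List.pairwise_append.mp hs).2.2
      exact fun x hx => this x hx v (by simp)
    have ht' : ∀ x ∈ t', v ≤ x := by
      rw [hsplit] at hs
      exact (List.pairwise_cons.mp (List.pairwise_append.mp hs).2.1).1
    have hC : v * (p.length : Int) - p.sum + (s.sum - p.sum)
        - v * ((s.length : Int) - (p.length : Int)) = costSum s v := by
      rw [hsplit]; exact cost_split p t' v hp ht'
    rw [PySem.List.enumerate_cons, List.foldl_cons]
    have step := ih (p ++ [v]) (PySem.Dict.insert d v (costSum s v)) k hsplit'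
    simp only [List.length_append, List.length_cons, List.length_nil,
      List.sum_append, List.sum_cons, List.sum_nil, add_zero, zero_add,
      Nat.cast_add, Nat.cast_one] at step
    rw [hC, step]
    by_cases hk : k ∈ t'
    · simp [hk]
    · by_cases hv : k = v
      · subst hv; simp [hk]
      · simp [hk, hv, PySem.Dict.getD_insert, List.mem_cons]

/-- Sums of a mapped permutation agree. -/
lemma costSum_perm {s a : List Int} (h : s.Perm a) (v : Int) :
    costSum s v = costSum a v := by
  unfold costSum; exact (h.map _).sum_eq

/-- The step of Python's `min(xs, key=f)` fold (first extremal element). -/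
def minStep (f : Int → Int) : Option Int → Int → Option Int := fun acc x =>
  match acc with
  | none => some x
  | some m => if f x < f m then some x else some m

lemma min?_eq_foldl_minStep (l : List Int) (f : Int → Int) :
    PySem.List.min? l f = List.foldl (minStep f) none l := by
  unfold PySem.List.min?
  congr 1
  funext acc x
  cases acc <;> rfl

lemma foldl_minStep_congr (f h : Int → Int) :
    ∀ (l : List Int) (acc : Option Int),
      (∀ x ∈ l, f x = h x) → (∀ m, acc = some m → f m = h m) →
      List.foldl (minStep f) acc l = List.foldl (minStep h) acc l := by
  intro l
  induction l with
  | nil => intro acc _ _; rfl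
  | cons x t ih =>
    intro acc hl hacc
    have hx : f x = h x := hl x (by simp)
    rw [List.foldl_cons, List.foldl_cons]
    cases acc with
    | none =>
      exact ih (some x) (fun y hy => hl y (by simp [hy]))
        (fun m hm => by cases hm; exact hx)
    | some m =>
      have hm : f m = h m := hacc m rfl
      by_cases hc : f x < f m
      · have hc' : h x < h m := by rw [← hx, ← hm]; exact hc
        simp only [minStep, hc, hc', if_true]
        exact ih (some x) (fun y hy => hl y (by simp [hy]))
          (fun m' hm' => by cases hm'; exact hx)
      · have hc' : ¬ h x < h m := by rw [← hx, ← hm]; exact hc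
        simp only [minStep, hc, hc', if_false]
        exact ih (some m) (fun y hy => hl y (by simp [hy]))
          (fun m' hm' => by cases hm'; exact hm)

lemma min?_congr (l : List Int) (f h : Int → Int) (H : ∀ x ∈ l, f x = h x) :
    PySem.List.min? l f = PySem.List.min? l h := by
  rw [min?_eq_foldl_minStep, min?_eq_foldl_minStep]
  exact foldl_minStep_congr f h l none H (fun m hm => by cases hm)

/-- The elements `Set.add`/`ofList` really appends, relative to the seen set. -/
def extraNew : List Int → List Int → List Int
  | _, [] => []
  | s, x :: l => if s.contains x then extraNew s l else x :: extraNew (s ++ [x]) l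

lemma foldl_add_eq_extraNew : ∀ (l s : List Int),
    List.foldl PySem.Set.add s l = s ++ extraNew s l := by
  intro l
  induction l with
  | nil => intro s; simp [extraNew]
  | cons x t ih =>
    intro s
    rw [List.foldl_cons]
    by_cases hc : s.contains x
    · simp only [extraNew, hc, if_true]
      rw [show PySem.Set.add s x = s by
        unfold PySem.Set.add PySem.Set.contains; rw [hc, if_pos rfl]]
      exact ih s
    · have hc' : s.contains x = false := by
        cases hcc : s.contains x
        · rfl
        · exact absurd hcc hc
      simp only [extraNew, hc', Bool.false_eq_true, if_false]
      rw [show PySem.Set.add s x = s ++ [x] by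
        unfold PySem.Set.add PySem.Set.contains; rw [hc']
        rw [if_neg]; simp]
      rw [ih (s ++ [x]), List.append_assoc]
      rfl

/-- Skipping duplicates does not change the first-minimum fold. -/
lemma foldl_minStep_extraNew (f : Int → Int) :
    ∀ (l s : List Int) (acc : Option Int),
      (∀ x ∈ s, ∃ m, acc = some m ∧ f m ≤ f x) →
      List.foldl (minStep f) acc (extraNew s l)
        = List.foldl (minStep f) acc l := by
  intro l
  induction l with
  | nil => intro s acc _; rfl
  | cons x t ih =>
    intro s acc hinv
    by_cases hc : s.contains x
    · have hxs : x ∈ s := by simpa using hc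
      obtain ⟨m, hacc, hle⟩ := hinv x hxs
      subst hacc
      simp only [extraNew, hc, if_true, List.foldl_cons, minStep,
        show ¬ f x < f m from not_lt.mpr hle, if_false]
      exact ih s (some m) hinv
    · have hc' : s.contains x = false := by
        cases hcc : s.contains x
        · rfl
        · exact absurd hcc hc
      simp only [extraNew, hc', Bool.false_eq_true, if_false, List.foldl_cons]
      cases acc with
      | none =>
        refine ih (s ++ [x]) (some x) ?_
        intro y hy
        rcases List.mem_append.mp hy with hy | hy
        · obtain ⟨m, hm, _⟩ := hinv y hy; cases hm
        · simp only [List.mem_singleton] at hy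
          exact ⟨x, rfl, by rw [hy]⟩
      | some m =>
        by_cases hx : f x < f m
        · simp only [minStep, hx, if_true]
          refine ih (s ++ [x]) (some x) ?_
          intro y hy
          rcases List.mem_append.mp hy with hy | hy
          · obtain ⟨m', hm', hle⟩ := hinv y hy
            cases hm'
            exact ⟨x, rfl, le_trans (le_of_lt hx) hle⟩
          · simp only [List.mem_singleton] at hy
            exact ⟨x, rfl, by rw [hy]⟩
        · simp only [minStep, hx, if_false]
          refine ih (s ++ [x]) (some m) ?_
          intro y hy
          rcases List.mem_append.mp hy with hy | hy
          · exact hinv y hy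
          · simp only [List.mem_singleton] at hy
            exact ⟨m, rfl, by rw [hy]; exact not_lt.mp hx⟩

lemma min?_dedup (l : List Int) (f : Int → Int) :
    PySem.List.min? (PySem.List.dedup l) f = PySem.List.min? l f := by
  rw [min?_eq_foldl_minStep, min?_eq_foldl_minStep]
  have : PySem.List.dedup l = extraNew [] l := by
    show PySem.Set.ofList l = extraNew [] l
    unfold PySem.Set.ofList
    rw [show (PySem.Set.empty : PySem.Set Int) = ([] : List Int) from rfl,
      foldl_add_eq_extraNew, List.nil_append]
  rw [this]
  exact foldl_minStep_extraNew f l [] none (by simp)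

/-- A computes the first minimum of `costSum a` over the deduplicated keys. -/
lemma solA (a : List Int) :
    solution a = (PySem.List.min? a (costSum a)).getD 0 := by
  unfold solution
  have hlam : (fun (d : PySem.Dict Int Int) i =>
      d.insert i (a.foldl (fun x j => x + |j - i|) 0))
      = fun (d : PySem.Dict Int Int) i => d.insert i (costSum a i) := by
    funext d i
    rw [PySem.List.foldl_add a (fun j => |j - i|) 0, zero_add]
    rfl
  simp only [hlam]
  have hkeys : (a.foldl (fun (d : PySem.Dict Int Int) i =>
      d.insert i (costSum a i)) PySem.Dict.empty).keys = PySem.List.dedup a := by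
    rw [PySem.Dict.keys_foldl_insert a (fun _ i => costSum a i) PySem.Dict.empty,
        PySem.Dict.keys_empty]
    rfl
  rw [hkeys]
  rw [min?_congr (PySem.List.dedup a)
      (fun k => (a.foldl (fun (d : PySem.Dict Int Int) i =>
        d.insert i (costSum a i)) PySem.Dict.empty).getD k 0) (costSum a)
      (by
        intro k hk
        show (a.foldl (fun (d : PySem.Dict Int Int) i =>
          d.insert i (costSum a i)) PySem.Dict.empty).getD k 0 = costSum a k
        rw [getD_foldl_insert_fun a (costSum a) PySem.Dict.empty k]
        simp [(PySem.List.mem_dedup a k).mp hk])]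
  rw [min?_dedup]

/-- B computes the first minimum of `costSum a` over `a` itself. -/
lemma solB (a : List Int) :
    solution_alt a = (PySem.List.min? a (costSum a)).getD 0 := by
  unfold solution_alt
  have hsum : (PySem.List.sorted a (fun x => x) false).foldl
      (fun acc x => acc + x) 0 = (PySem.List.sorted a (fun x => x) false).sum := by
    rw [PySem.List.foldl_add _ (fun x => x) 0, zero_add]
    simp
  simp only [hsum]
  have hpair : List.Pairwise (fun a b : Int => a ≤ b)
      (PySem.List.sorted a (fun x => x) false) := by
    simpa using PySem.List.sorted_pairwise a (fun x => x)
  have hfold := fun (k : Int) => Bfold (PySem.List.sorted a (fun x => x) false) hpair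
    (PySem.List.sorted a (fun x => x) false) [] PySem.Dict.empty k
    (List.nil_append _).symm
  simp only [List.length_nil, Nat.cast_zero, List.sum_nil] at hfold
  rw [min?_congr a _ (costSum a)
    (by
      intro v hv
      show (((PySem.List.enumerate (PySem.List.sorted a (fun x => x) false) 0).foldl
          (fun (st : PySem.Dict Int Int × Int) iv =>
            (st.1.insert iv.2 (iv.2 * iv.1 - st.2
               + ((PySem.List.sorted a (fun x => x) false).sum - st.2)
               - iv.2 * (((PySem.List.sorted a (fun x => x) false).length : Int) - iv.1)),
             st.2 + iv.2))
          (PySem.Dict.empty, 0)).1).getD v 0 = costSum a v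
      rw [hfold v]
      have hvs : v ∈ PySem.List.sorted a (fun x => x) false :=
        (PySem.List.mem_sorted a (fun x => x) false v).mpr hv
      rw [if_pos hvs]
      exact costSum_perm (PySem.List.sorted_perm a (fun x => x) false) v)]

-- ===== VERDICT =====
theorem solution_spec : Claim_equal_solution := by
  unfold Claim_equal_solution Spec_solution
  intro a _ _
  rw [solA, solB]
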